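-- pv_equiv track=rewrite | github.com/falconerdean/pm-skills | hooks/analyze_session.py | analyze_subagent_patterns
-- ===== SOURCE A (Python) =====
-- from collections import Counter, defaultdict
--
-- def analyze_subagent_patterns(events):
--     """Analyze subagent spawning patterns."""
--     agents = defaultdict(lambda: {"starts": 0, "stops": 0, "types": set()})
--
--     for event in events:
--         agent_id = event.get("agent_id", "unknown")
--         event_type = event.get("event_type", "")
--
--         if "start" in event_type:
--             agents[agent_id]["starts"] += 1
--         elif "stop" in event_type:
--             agents[agent_id]["stops"] += 1
--
--         if event.get("agent_type"):
--             agents[agent_id]["types"].add(event["agent_type"])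
--
--     return {
--         "total_subagents": len(agents),
--         "orphaned": sum(1 for a in agents.values() if a["starts"] > a["stops"]),
--     }
-- ===== SOURCE B (Python) =====
-- from collections import Counter
--
--
-- def analyze_subagent_patterns(events):
--     """Analyze subagent spawning patterns."""
--     starts = Counter(
--         e.get("agent_id", "unknown")
--         for e in events
--         if "start" in e.get("event_type", "")
--     )
--     stops = Counter(
--         e.get("agent_id", "unknown")
--         for e in events
--         if "start" not in e.get("event_type", "") and "stop" in e.get("event_type", "")
--     )
--     typed = {e.get("agent_id", "unknown") for e in events if e.get("agent_type")}
--     tracked = set(starts) | set(stops) | typed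
--     return {
--         "total_subagents": len(tracked),
--         "orphaned": sum(1 for a in tracked if starts[a] > stops[a]),
--     }
-- ===== Notes on version B (the rewrite author's own statement) =====
-- stated objective: alternative
-- what changed: Replaces A's single fused pass building one defaultdict of per-agent {starts, stops, types} records with separate tables built in their own passes - a Counter of agent ids over start events, a Counter over stop events, and a set of tracked agent ids - then aggregates from those tables, dropping the unused per-agent types set.
import Mathlib
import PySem

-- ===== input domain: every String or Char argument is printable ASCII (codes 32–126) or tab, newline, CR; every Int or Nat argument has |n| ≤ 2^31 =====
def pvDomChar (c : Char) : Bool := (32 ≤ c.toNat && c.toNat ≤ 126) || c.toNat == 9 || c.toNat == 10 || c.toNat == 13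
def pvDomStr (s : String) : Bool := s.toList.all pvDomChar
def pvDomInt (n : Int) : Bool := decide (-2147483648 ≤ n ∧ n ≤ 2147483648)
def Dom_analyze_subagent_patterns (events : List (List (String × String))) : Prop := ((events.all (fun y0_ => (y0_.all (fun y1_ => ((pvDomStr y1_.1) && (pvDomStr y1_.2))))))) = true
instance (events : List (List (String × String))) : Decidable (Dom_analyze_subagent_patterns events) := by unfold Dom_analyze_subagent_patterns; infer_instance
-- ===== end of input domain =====

-- B replaces A's single fused defaultdict pass by independent start/stop Counters plus a
-- tracked-agents set, dropping the unused per-agent types set (objective: simpler decomposition).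

-- shared helper: event.get(k, dflt) on an event dict (first-match association-list lookup)
def pvGet (e : List (String × String)) (k dflt : String) : String :=
  (PySem.Dict.mk e).getD k dflt

-- ===== PORT A =====
-- loop body of A's single pass over events (defaultdict of {"starts","stops","types"})
def pvAStep (d : PySem.Dict String (Int × Int × PySem.Set String))
    (e : List (String × String)) : PySem.Dict String (Int × Int × PySem.Set String) :=
  let aid := pvGet e "agent_id" "unknown"
  let et := pvGet e "event_type" ""
  let d1 :=
    if PySem.Str.isIn "start" et then
      let v := d.getD aid (0, 0, PySem.Set.empty)
      d.insert aid (v.1 + 1, v.2.1, v.2.2)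
    else if PySem.Str.isIn "stop" et then
      let v := d.getD aid (0, 0, PySem.Set.empty)
      d.insert aid (v.1, v.2.1 + 1, v.2.2)
    else d
  if pvGet e "agent_type" "" ≠ "" then
    let v := d1.getD aid (0, 0, PySem.Set.empty)
    d1.insert aid (v.1, v.2.1, PySem.Set.add v.2.2 (pvGet e "agent_type" ""))
  else d1

def analyze_subagent_patterns (events : List (List (String × String))) : List (String × Int) :=
  let agents := events.foldl pvAStep PySem.Dict.empty
  [("total_subagents", (agents.size : Int)),
   ("orphaned", ((agents.values.countP (fun v => decide (v.2.1 < v.1)) : Nat) : Int))]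

-- ===== PORT B =====
def analyze_subagent_patterns_alt (events : List (List (String × String))) : List (String × Int) :=
  let starts := PySem.Dict.counter
    ((events.filter (fun e => PySem.Str.isIn "start" (pvGet e "event_type" ""))).map
      (fun e => pvGet e "agent_id" "unknown"))
  let stops := PySem.Dict.counter
    ((events.filter (fun e =>
        !PySem.Str.isIn "start" (pvGet e "event_type" "") &&
        PySem.Str.isIn "stop" (pvGet e "event_type" ""))).map
      (fun e => pvGet e "agent_id" "unknown"))
  let typed := PySem.Set.ofList
    ((events.filter (fun e => pvGet e "agent_type" "" != "")).map
      (fun e => pvGet e "agent_id" "unknown"))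
  let tracked := PySem.Set.union
    (PySem.Set.union (PySem.Set.ofList starts.keys) stops.keys) typed
  [("total_subagents", (PySem.Set.len tracked : Int)),
   ("orphaned",
     ((tracked.countP (fun a => decide (stops.getD a 0 < starts.getD a 0)) : Nat) : Int))]

-- ===== PRECONDITION & SPEC =====
def Spec_analyze_subagent_patterns (events : List (List (String × String))) (out : List (String × Int)) : Prop := out = analyze_subagent_patterns_alt events
instance (events : List (List (String × String))) (out : List (String × Int)) : Decidable (Spec_analyze_subagent_patterns events out) := by unfold Spec_analyze_subagent_patterns; infer_instance

-- ===== CLAIM (what is proved, stated in full; the proofs are below) =====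
def Claim_equal_analyze_subagent_patterns : Prop := ∀ (events : List (List (String × String))), Dom_analyze_subagent_patterns events → Spec_analyze_subagent_patterns events (analyze_subagent_patterns events)

-- ===== LEMMAS AND PROOFS =====

-- abbreviations for the event fields (proof-only)
def pvAid (e : List (String × String)) : String := pvGet e "agent_id" "unknown"
def pvIsStart (e : List (String × String)) : Bool :=
  PySem.Str.isIn "start" (pvGet e "event_type" "")
def pvIsStop (e : List (String × String)) : Bool :=
  !pvIsStart e && PySem.Str.isIn "stop" (pvGet e "event_type" "")
def pvHasTy (e : List (String × String)) : Bool := pvGet e "agent_type" "" != ""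
def pvTouched (e : List (String × String)) : Bool :=
  pvIsStart e || PySem.Str.isIn "stop" (pvGet e "event_type" "") || pvHasTy e

def pvDf : Int × Int × PySem.Set String := (0, 0, PySem.Set.empty)

lemma pvAStep_getD_fst (d : PySem.Dict String (Int × Int × PySem.Set String))
    (e : List (String × String)) (a : String) :
    ((pvAStep d e).getD a pvDf).1 =
      (d.getD a pvDf).1 + (if pvAid e = a ∧ pvIsStart e then 1 else 0) := by
  simp only [pvAStep, pvAid, pvIsStart, pvDf]
  split_ifs with h1 h2 h3 h4 h5 <;>
    simp_all [PySem.Dict.getD_insert] <;> split_ifs <;> simp_all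

lemma pvAStep_getD_stops (d : PySem.Dict String (Int × Int × PySem.Set String))
    (e : List (String × String)) (a : String) :
    ((pvAStep d e).getD a pvDf).2.1 =
      (d.getD a pvDf).2.1 + (if pvAid e = a ∧ pvIsStop e then 1 else 0) := by
  simp only [pvAStep, pvAid, pvIsStop, pvIsStart, pvDf]
  split_ifs with h1 h2 h3 h4 h5 <;>
    simp_all [PySem.Dict.getD_insert] <;> split_ifs <;> simp_all

lemma pvFoldl_getD_fst (l : List (List (String × String)))
    (d : PySem.Dict String (Int × Int × PySem.Set String)) (a : String) :
    ((l.foldl pvAStep d).getD a pvDf).1 =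
      (d.getD a pvDf).1 + (l.countP (fun e => decide (pvAid e = a) && pvIsStart e) : Int) := by
  induction l generalizing d with
  | nil => simp
  | cons e l ih =>
    simp only [List.foldl_cons, ih, pvAStep_getD_fst, List.countP_cons]
    by_cases h : pvAid e = a ∧ pvIsStart e = true
    · simp [h.1, h.2]; ring
    · have : (decide (pvAid e = a) && pvIsStart e) = false := by
        rcases Decidable.not_and_iff_not_or_not.mp h with h' | h' <;> simp [h']
      simp [this, h]

lemma pvFoldl_getD_stops (l : List (List (String × String)))
    (d : PySem.Dict String (Int × Int × PySem.Set String)) (a : String) :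
    ((l.foldl pvAStep d).getD a pvDf).2.1 =
      (d.getD a pvDf).2.1 + (l.countP (fun e => decide (pvAid e = a) && pvIsStop e) : Int) := by
  induction l generalizing d with
  | nil => simp
  | cons e l ih =>
    simp only [List.foldl_cons, ih, pvAStep_getD_stops, List.countP_cons]
    by_cases h : pvAid e = a ∧ pvIsStop e = true
    · simp [h.1, h.2]; ring
    · have : (decide (pvAid e = a) && pvIsStop e) = false := by
        rcases Decidable.not_and_iff_not_or_not.mp h with h' | h' <;> simp [h']
      simp [this, h]

lemma pvAStep_mem_keys (d : PySem.Dict String (Int × Int × PySem.Set String))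
    (e : List (String × String)) (a : String) :
    a ∈ (pvAStep d e).keys ↔ a ∈ d.keys ∨ (pvAid e = a ∧ pvTouched e = true) := by
  simp only [pvAStep, pvAid, pvTouched, pvIsStart, pvHasTy]
  split_ifs with h1 h2 h3 h4 h5 <;>
    simp_all [PySem.Dict.mem_keys_insert] <;> tauto

lemma pvAStep_nodup_keys (d : PySem.Dict String (Int × Int × PySem.Set String))
    (e : List (String × String)) (h : d.keys.Nodup) : (pvAStep d e).keys.Nodup := by
  simp only [pvAStep]
  split_ifs <;> simp_all [PySem.Dict.nodup_keys_insert]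

lemma pvFoldl_nodup_keys (l : List (List (String × String)))
    (d : PySem.Dict String (Int × Int × PySem.Set String)) (h : d.keys.Nodup) :
    (l.foldl pvAStep d).keys.Nodup := by
  induction l generalizing d with
  | nil => exact h
  | cons e l ih => exact ih _ (pvAStep_nodup_keys d e h)

lemma pvFoldl_mem_keys (l : List (List (String × String)))
    (d : PySem.Dict String (Int × Int × PySem.Set String)) (a : String) :
    a ∈ (l.foldl pvAStep d).keys ↔
      a ∈ d.keys ∨ ∃ e ∈ l, pvAid e = a ∧ pvTouched e = true := by
  induction l generalizing d with
  | nil => simp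
  | cons e l ih =>
    simp only [List.foldl_cons, ih, pvAStep_mem_keys, List.mem_cons]
    constructor
    · rintro ((h | h) | ⟨x, hx, h⟩)
      · exact Or.inl h
      · exact Or.inr ⟨e, Or.inl rfl, h⟩
      · exact Or.inr ⟨x, Or.inr hx, h⟩
    · rintro (h | ⟨x, (rfl | hx), h⟩)
      · exact Or.inl (Or.inl h)
      · exact Or.inl (Or.inr h)
      · exact Or.inr ⟨x, hx, h⟩

-- membership in B's tracked set, in the same shape as pvFoldl_mem_keys
lemma pvTracked_mem (events : List (List (String × String))) (a : String) :
    (a ∈ PySem.Set.union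
        (PySem.Set.union
          (PySem.Set.ofList (PySem.Dict.counter
            ((events.filter (fun e => PySem.Str.isIn "start" (pvGet e "event_type" ""))).map
              (fun e => pvGet e "agent_id" "unknown"))).keys)
          (PySem.Dict.counter
            ((events.filter (fun e =>
                !PySem.Str.isIn "start" (pvGet e "event_type" "") &&
                PySem.Str.isIn "stop" (pvGet e "event_type" ""))).map
              (fun e => pvGet e "agent_id" "unknown"))).keys)
        (PySem.Set.ofList
          ((events.filter (fun e => pvGet e "agent_type" "" != "")).map
            (fun e => pvGet e "agent_id" "unknown")))) ↔
      ∃ e ∈ events, pvAid e = a ∧ pvTouched e = true := by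
  simp only [PySem.Set.mem_union, PySem.Dict.keys_counter, PySem.Set.mem_ofList,
    List.mem_map, List.mem_filter, pvAid, pvTouched, pvIsStart, pvHasTy]
  constructor
  · rintro ((⟨e, ⟨he, hp⟩, rfl⟩ | ⟨e, ⟨he, hp⟩, rfl⟩) | ⟨e, ⟨he, hp⟩, rfl⟩)
    · exact ⟨e, he, rfl, by simp_all⟩
    · exact ⟨e, he, rfl, by simp_all⟩
    · exact ⟨e, he, rfl, by simp_all⟩
  · rintro ⟨e, he, rfl, ht⟩
    by_cases h1 : PySem.Str.isIn "start" (pvGet e "event_type" "") = true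
    · exact Or.inl (Or.inl ⟨e, ⟨he, h1⟩, rfl⟩)
    · by_cases h2 : PySem.Str.isIn "stop" (pvGet e "event_type" "") = true
      · exact Or.inl (Or.inr ⟨e, ⟨he, by simp_all⟩, rfl⟩)
      · refine Or.inr ⟨e, ⟨he, ?_⟩, rfl⟩
        simp_all

-- ===== VERDICT (by name: the statement is the Claim_ definition above) =====
theorem analyze_subagent_patterns_spec : Claim_equal_analyze_subagent_patterns := by
  intro events _hdom
  unfold Spec_analyze_subagent_patterns
  simp only [analyze_subagent_patterns, analyze_subagent_patterns_alt]
  set D := events.foldl pvAStep PySem.Dict.empty with hD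
  set T := PySem.Set.union
    (PySem.Set.union
      (PySem.Set.ofList (PySem.Dict.counter
        ((events.filter (fun e => PySem.Str.isIn "start" (pvGet e "event_type" ""))).map
          (fun e => pvGet e "agent_id" "unknown"))).keys)
      (PySem.Dict.counter
        ((events.filter (fun e =>
            !PySem.Str.isIn "start" (pvGet e "event_type" "") &&
            PySem.Str.isIn "stop" (pvGet e "event_type" ""))).map
          (fun e => pvGet e "agent_id" "unknown"))).keys)
    (PySem.Set.ofList
      ((events.filter (fun e => pvGet e "agent_type" "" != "")).map
        (fun e => pvGet e "agent_id" "unknown"))) with hT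
  have hDnodup : D.keys.Nodup := pvFoldl_nodup_keys events PySem.Dict.empty (by simp)
  have hTnodup : T.Nodup := by
    rw [hT]
    exact PySem.Set.nodup_union _ _ (PySem.Set.nodup_union _ _ (PySem.Set.nodup_ofList _))
  have hPerm : D.keys.Perm T := by
    refine (List.perm_ext_iff_of_nodup hDnodup hTnodup).mpr fun a => ?_
    rw [hD, pvFoldl_mem_keys, hT, pvTracked_mem]
    simp
  -- component (1): sizes agree
  have hSize : (D.size : Int) = (PySem.Set.len T : Int) := by
    have : D.size = D.keys.length := by simp [PySem.Dict.size, PySem.Dict.keys]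
    rw [this, PySem.Set.len, hPerm.length_eq]
  -- per-agent count facts
  have hStartsD : ∀ a : String, (D.getD a pvDf).1 =
      ((events.countP (fun e => decide (pvAid e = a) && pvIsStart e) : Nat) : Int) := by
    intro a
    rw [hD, pvFoldl_getD_fst]
    simp [pvDf]
  have hStopsD : ∀ a : String, (D.getD a pvDf).2.1 =
      ((events.countP (fun e => decide (pvAid e = a) && pvIsStop e) : Nat) : Int) := by
    intro a
    rw [hD, pvFoldl_getD_stops]
    simp [pvDf]
  have hStartsB : ∀ a : String,
      (PySem.Dict.counter
        ((events.filter (fun e => PySem.Str.isIn "start" (pvGet e "event_type" ""))).map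
          (fun e => pvGet e "agent_id" "unknown"))).getD a 0 =
      ((events.countP (fun e => decide (pvAid e = a) && pvIsStart e) : Nat) : Int) := by
    intro a
    rw [PySem.Dict.getD_counter]
    congr 1
    simp only [List.count, List.countP_map, List.countP_filter, Function.comp_def]
    refine List.countP_congr fun e _ => ?_
    simp [pvAid, pvIsStart, Bool.beq_eq_decide_eq]
  have hStopsB : ∀ a : String,
      (PySem.Dict.counter
        ((events.filter (fun e =>
            !PySem.Str.isIn "start" (pvGet e "event_type" "") &&
            PySem.Str.isIn "stop" (pvGet e "event_type" ""))).map
          (fun e => pvGet e "agent_id" "unknown"))).getD a 0 =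
      ((events.countP (fun e => decide (pvAid e = a) && pvIsStop e) : Nat) : Int) := by
    intro a
    rw [PySem.Dict.getD_counter]
    congr 1
    simp only [List.count, List.countP_map, List.countP_filter, Function.comp_def]
    refine List.countP_congr fun e _ => ?_
    simp [pvAid, pvIsStop, pvIsStart, Bool.beq_eq_decide_eq, Bool.and_comm]
  -- component (2): orphan counts agree
  have hOrph : D.values.countP (fun v => decide (v.2.1 < v.1)) =
      T.countP (fun a =>
        decide ((PySem.Dict.counter
          ((events.filter (fun e =>
              !PySem.Str.isIn "start" (pvGet e "event_type" "") &&
              PySem.Str.isIn "stop" (pvGet e "event_type" ""))).map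
            (fun e => pvGet e "agent_id" "unknown"))).getD a 0 <
          (PySem.Dict.counter
            ((events.filter (fun e => PySem.Str.isIn "start" (pvGet e "event_type" ""))).map
              (fun e => pvGet e "agent_id" "unknown"))).getD a 0)) := by
    rw [PySem.Dict.values_eq_map_keys D hDnodup pvDf, List.countP_map]
    rw [hPerm.countP_eq]
    refine List.countP_congr fun a _ => ?_
    simp only [Function.comp_def, hStartsD a, hStopsD a, hStartsB a, hStopsB a]
  simp only [hSize, hOrph]
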